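-- pv_equiv track=rewrite | github.com/DeRoostermakers/Heuristieken | Code/Classes/rooster.py | bonus
-- ===== SOURCE A (Python) =====
-- def bonus(perGroep):
--     "Berekent de bonuspunten van de vakspreiding"
--     bonus = 0
--
--     # kijkt per werkgroep (vanuti student) of de verdeling van de activiteiten goed is
--     for groep in perGroep:
--         groep.sort()
--         # twee activiteiten: dan moeten er twee dagen tussen de activiteiten zitten
--         if len(groep) == 2:
--             if groep[1] - groep[0] == 3:
--                 bonus += 20
--         # drie activiteiten: moeten er twee dagen tussen alle drie de activiteiten zitten
--         if len(groep) == 3: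
--             if groep[1] - groep[0] == 2 and groep[2] - groep[1] == 2:
--                 bonus += 20
--         # vier activiteiten: eerste twee, en laatste twee moet een dag tussen zitten
--         if len(groep) == 4:
--             if groep[1] - groep[0] == 1 and groep[2] - groep[1] == 2 and groep[3] - groep[2] == 1:
--                 bonus += 20
--
--     return bonus
-- ===== SOURCE B (Python) =====
-- _GOOD = (frozenset({0, 3}), frozenset({0, 2, 4}), frozenset({0, 1, 3, 4}))
--
-- def bonus(perGroep):
--     "Berekent de bonuspunten van de vakspreiding"
--     total = 0
--     for groep in perGroep:
--         if groep:
--             m = min(groep)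
--             offsets = frozenset(x - m for x in groep)
--             if len(offsets) == len(groep) and offsets in _GOOD:
--                 total += 20
--     return total
-- ===== Notes on version B (the rewrite author's own statement) =====
-- stated objective: alternative
-- what changed: B never sorts or looks at consecutive differences: it recognizes a rewarded group by the set of its offsets from the minimum (len(set)==len(group) for distinctness, then membership among the three target frozensets {0,3},{0,2,4},{0,1,3,4}); A sorts each group in place while B does not mutate its argument (return values agree).
import Mathlib
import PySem

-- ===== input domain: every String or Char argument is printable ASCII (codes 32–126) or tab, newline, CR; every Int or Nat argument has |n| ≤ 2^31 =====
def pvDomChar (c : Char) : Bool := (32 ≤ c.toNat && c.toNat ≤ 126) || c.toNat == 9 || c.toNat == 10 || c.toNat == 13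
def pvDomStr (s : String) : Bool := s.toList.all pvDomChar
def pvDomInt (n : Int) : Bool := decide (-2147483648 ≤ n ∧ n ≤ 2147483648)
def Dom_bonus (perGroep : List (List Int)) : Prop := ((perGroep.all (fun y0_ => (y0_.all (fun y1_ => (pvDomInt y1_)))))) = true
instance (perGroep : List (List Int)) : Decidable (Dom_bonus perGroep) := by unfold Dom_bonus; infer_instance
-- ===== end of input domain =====

-- B recognizes each group by its SET of offsets from the minimum (no sorting, no consecutive-difference
-- patterns); A sorts each group in place while B does not mutate — the equivalence is about the return value only.

-- ===== PORT A =====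
def bonusStepA (b : Int) (groep : List Int) : Int :=
  let g := PySem.List.sorted groep (fun x => x) false
  let b := if g.length = 2 then
      (if PySem.List.pyGetD g 1 0 - PySem.List.pyGetD g 0 0 = 3 then b + 20 else b)
    else b
  let b := if g.length = 3 then
      (if PySem.List.pyGetD g 1 0 - PySem.List.pyGetD g 0 0 = 2 ∧
          PySem.List.pyGetD g 2 0 - PySem.List.pyGetD g 1 0 = 2 then b + 20 else b)
    else b
  let b := if g.length = 4 then
      (if PySem.List.pyGetD g 1 0 - PySem.List.pyGetD g 0 0 = 1 ∧
          PySem.List.pyGetD g 2 0 - PySem.List.pyGetD g 1 0 = 2 ∧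
          PySem.List.pyGetD g 3 0 - PySem.List.pyGetD g 2 0 = 1 then b + 20 else b)
    else b
  b

def bonus (perGroep : List (List Int)) : Int := perGroep.foldl bonusStepA 0

-- ===== PORT B =====
-- the tuple _GOOD of Source B: the three frozensets, each as its PySem.Set (distinct elements)
def pvGood : List (PySem.Set Int) := [[0, 3], [0, 2, 4], [0, 1, 3, 4]]

def bonusStepB (total : Int) (groep : List Int) : Int :=
  match PySem.List.min? groep (fun x => x) with
  | none => total          -- 'if groep:' — an empty group has no minimum and earns nothing
  | some m =>
    let offsets : PySem.Set Int := PySem.Set.ofList (groep.map (fun x => x - m))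
    if PySem.Set.len offsets = PySem.List.len groep ∧
        pvGood.any (fun t => PySem.Set.equal offsets t) = true
    then total + 20 else total

def bonus_alt (perGroep : List (List Int)) : Int := perGroep.foldl bonusStepB 0

-- ===== PRECONDITION & SPEC =====
def Spec_bonus (perGroep : List (List Int)) (out : Int) : Prop := out = bonus_alt perGroep
instance (perGroep : List (List Int)) (out : Int) : Decidable (Spec_bonus perGroep out) := by unfold Spec_bonus; infer_instance

-- ===== CLAIM (what is proved, stated in full; the proofs are below) =====
def Claim_equal_bonus : Prop := ∀ (perGroep : List (List Int)), Dom_bonus perGroep → Spec_bonus perGroep (bonus perGroep)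

-- ===== LEMMAS AND PROOFS =====

-- A's loop body with the sorted list abstracted out (bonusStepA b g = pvAcore b (sorted g))
def pvAcore (b : Int) (g : List Int) : Int :=
  let b := if g.length = 2 then
      (if PySem.List.pyGetD g 1 0 - PySem.List.pyGetD g 0 0 = 3 then b + 20 else b)
    else b
  let b := if g.length = 3 then
      (if PySem.List.pyGetD g 1 0 - PySem.List.pyGetD g 0 0 = 2 ∧
          PySem.List.pyGetD g 2 0 - PySem.List.pyGetD g 1 0 = 2 then b + 20 else b)
    else b
  let b := if g.length = 4 then
      (if PySem.List.pyGetD g 1 0 - PySem.List.pyGetD g 0 0 = 1 ∧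
          PySem.List.pyGetD g 2 0 - PySem.List.pyGetD g 1 0 = 2 ∧
          PySem.List.pyGetD g 3 0 - PySem.List.pyGetD g 2 0 = 1 then b + 20 else b)
    else b
  b

theorem bonusStepA_eq (b : Int) (g : List Int) :
    bonusStepA b g = pvAcore b (PySem.List.sorted g (fun x => x) false) := rfl

-- the minimum value is permutation-invariant
theorem pv_min?_perm {g h : List Int} (hp : g.Perm h) :
    PySem.List.min? g (fun x => x) = PySem.List.min? h (fun x => x) := by
  cases hg : PySem.List.min? g (fun x => x) with
  | none =>
      rw [PySem.List.min?_eq_none_iff] at hg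
      symm; rw [PySem.List.min?_eq_none_iff]
      subst hg
      exact hp.symm.eq_nil
  | some m =>
      cases hh : PySem.List.min? h (fun x => x) with
      | none =>
          rw [PySem.List.min?_eq_none_iff] at hh
          subst hh
          rw [(PySem.List.min?_eq_none_iff g _).2 hp.eq_nil] at hg
          exact absurd hg (by simp)
      | some n =>
          have hmg := PySem.List.min?_mem hg
          have hnh := PySem.List.min?_mem hh
          have h1 := PySem.List.min?_isMin hg n (hp.mem_iff.2 hnh)
          have h2 := PySem.List.min?_isMin hh m (hp.mem_iff.1 hmg)
          simp only [le_antisymm h1 h2]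

-- distinct-length characterization: the set of a list has the list's size iff the list has no duplicates
theorem pv_len_ofList_eq_iff (L : List Int) :
    (PySem.Set.ofList L).length = L.length ↔ L.Nodup := by
  induction L with
  | nil => simp
  | cons x xs ih =>
    rw [PySem.Set.ofList_cons]
    by_cases hx : x ∈ xs
    · constructor
      · intro h
        exfalso
        have hmem : x ∈ PySem.Set.ofList xs := (PySem.Set.mem_ofList xs x).2 hx
        have hlt : ((PySem.Set.ofList xs).filter (fun y => !y == x)).length <
            (PySem.Set.ofList xs).length := by
          apply List.length_filter_lt_length_iff_exists.2
          exact ⟨x, hmem, by simp⟩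
        have hle := PySem.Set.length_ofList_le xs
        simp only [PySem.Set.discard, List.length_cons] at h
        omega
      · intro h
        exact absurd hx (by simp [List.nodup_cons] at h; exact h.1)
    · have hkeep : (PySem.Set.ofList xs).filter (fun y => !y == x) = PySem.Set.ofList xs := by
        apply List.filter_eq_self.2
        intro y hy
        simp only [Bool.not_eq_eq_eq_not, Bool.not_true, beq_eq_false_iff_ne, ne_eq]
        intro he
        exact hx (he ▸ (PySem.Set.mem_ofList xs y).1 hy)
      simp [PySem.Set.discard, hkeep, List.nodup_cons, hx, ih]

-- equal sets of equal-nodup lists have equal length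
theorem pv_equal_length {s t : PySem.Set Int} (hs : List.Nodup s) (ht : List.Nodup t)
    (he : PySem.Set.equal s t = true) : s.length = t.length :=
  ((List.perm_ext_iff_of_nodup hs ht).2 ((PySem.Set.equal_iff s t).1 he)).length_eq

-- two strictly sorted lists that are equal as sets are equal as lists
theorem pv_equal_sorted_eq {L T : List Int} (hL : List.Pairwise (· < ·) L)
    (hT : List.Pairwise (· < ·) T) (he : PySem.Set.equal L T = true) : L = T :=
  List.Perm.eq_of_pairwise (fun _ _ _ _ h1 h2 => absurd h2 (lt_asymm h1)) hL hT
    ((List.perm_ext_iff_of_nodup hL.nodup hT.nodup).2 ((PySem.Set.equal_iff L T).1 he))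

-- B's step is permutation-invariant
theorem pv_stepB_perm {g h : List Int} (hp : g.Perm h) (total : Int) :
    bonusStepB total g = bonusStepB total h := by
  unfold bonusStepB
  rw [pv_min?_perm hp]
  cases hm : PySem.List.min? h (fun x => x) with
  | none => rfl
  | some m =>
    have hmemiff : ∀ x, x ∈ PySem.Set.ofList (g.map (fun x => x - m)) ↔
        x ∈ PySem.Set.ofList (h.map (fun x => x - m)) := by
      intro x
      simp only [PySem.Set.mem_ofList]
      exact (hp.map _).mem_iff
    have hperm2 : (PySem.Set.ofList (g.map (fun x => x - m))).Perm
        (PySem.Set.ofList (h.map (fun x => x - m))) :=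
      (List.perm_ext_iff_of_nodup (PySem.Set.nodup_ofList _) (PySem.Set.nodup_ofList _)).2 hmemiff
    have hlen : PySem.Set.len (PySem.Set.ofList (g.map (fun x => x - m))) =
        PySem.Set.len (PySem.Set.ofList (h.map (fun x => x - m))) := by
      simp [PySem.Set.len, hperm2.length_eq]
    have heq : ∀ t, PySem.Set.equal (PySem.Set.ofList (g.map (fun x => x - m))) t =
        PySem.Set.equal (PySem.Set.ofList (h.map (fun x => x - m))) t := by
      intro t
      rw [Bool.eq_iff_iff, PySem.Set.equal_iff, PySem.Set.equal_iff]
      constructor <;> intro hh x <;> rw [← hh x] <;> [exact (hmemiff x).symm; exact hmemiff x]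
    simp only [PySem.List.len_eq, hp.length_eq, hlen,
      PySem.List.any_congr_mem (fun t _ => heq t)]
    rfl

-- per-shape characterizations of B's condition on the offset list
theorem pv_cond2 (d : Int) (hd : 0 ≤ d) :
    (PySem.Set.len (PySem.Set.ofList [0, d]) = 2 ∧
      pvGood.any (fun t => PySem.Set.equal (PySem.Set.ofList [0, d]) t) = true) ↔ d = 3 := by
  constructor
  · rintro ⟨hlen, hany⟩
    have hnd : ([0, d] : List Int).Nodup := by
      rw [← pv_len_ofList_eq_iff]
      have h2 : (PySem.Set.ofList [0, d]).length = 2 := by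
        have : ((PySem.Set.ofList [0, d]).length : Int) = 2 := by simpa [PySem.Set.len] using hlen
        exact_mod_cast this
      simpa using h2
    have hself := PySem.Set.ofList_eq_self_of_nodup _ hnd
    have hd0 : d ≠ 0 := by simpa [List.nodup_cons, eq_comm] using hnd
    have hsort : List.Pairwise (· < ·) ([0, d] : List Int) := by
      simp [List.pairwise_cons]; omega
    rw [hself] at hany
    simp only [pvGood, List.any_eq_true, List.mem_cons, List.not_mem_nil, or_false] at hany
    obtain ⟨t, htmem, hte⟩ := hany
    rcases htmem with rfl | rfl | rfl
    · have := pv_equal_sorted_eq hsort (by decide) hte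
      simpa using this
    · have := pv_equal_sorted_eq hsort (by decide) hte
      simp at this
    · have := pv_equal_sorted_eq hsort (by decide) hte
      simp at this
  · rintro rfl
    exact ⟨by decide, by decide⟩

theorem pv_cond3 (p q : Int) (hp : 0 ≤ p) (hpq : p ≤ q) :
    (PySem.Set.len (PySem.Set.ofList [0, p, q]) = 3 ∧
      pvGood.any (fun t => PySem.Set.equal (PySem.Set.ofList [0, p, q]) t) = true) ↔
    (p = 2 ∧ q = 4) := by
  constructor
  · rintro ⟨hlen, hany⟩
    have hnd : ([0, p, q] : List Int).Nodup := by
      rw [← pv_len_ofList_eq_iff]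
      have h2 : (PySem.Set.ofList [0, p, q]).length = 3 := by
        have : ((PySem.Set.ofList [0, p, q]).length : Int) = 3 := by simpa [PySem.Set.len] using hlen
        exact_mod_cast this
      simpa using h2
    have hself := PySem.Set.ofList_eq_self_of_nodup _ hnd
    have hfacts : (p ≠ 0 ∧ q ≠ 0) ∧ p ≠ q := by
      simpa [List.nodup_cons, eq_comm] using hnd
    have hsort : List.Pairwise (· < ·) ([0, p, q] : List Int) := by
      simp [List.pairwise_cons]
      omega
    rw [hself] at hany
    simp only [pvGood, List.any_eq_true, List.mem_cons, List.not_mem_nil, or_false] at hany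
    obtain ⟨t, htmem, hte⟩ := hany
    rcases htmem with rfl | rfl | rfl
    · have := pv_equal_sorted_eq hsort (by decide) hte
      simp at this
    · have := pv_equal_sorted_eq hsort (by decide) hte
      simpa using this
    · have := pv_equal_sorted_eq hsort (by decide) hte
      simp at this
  · rintro ⟨rfl, rfl⟩
    exact ⟨by decide, by decide⟩

theorem pv_cond4 (p q r : Int) (hp : 0 ≤ p) (hpq : p ≤ q) (hqr : q ≤ r) :
    (PySem.Set.len (PySem.Set.ofList [0, p, q, r]) = 4 ∧
      pvGood.any (fun t => PySem.Set.equal (PySem.Set.ofList [0, p, q, r]) t) = true) ↔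
    (p = 1 ∧ q = 3 ∧ r = 4) := by
  constructor
  · rintro ⟨hlen, hany⟩
    have hnd : ([0, p, q, r] : List Int).Nodup := by
      rw [← pv_len_ofList_eq_iff]
      have h2 : (PySem.Set.ofList [0, p, q, r]).length = 4 := by
        have : ((PySem.Set.ofList [0, p, q, r]).length : Int) = 4 := by simpa [PySem.Set.len] using hlen
        exact_mod_cast this
      simpa using h2
    have hself := PySem.Set.ofList_eq_self_of_nodup _ hnd
    have hfacts : (p ≠ 0 ∧ q ≠ 0 ∧ r ≠ 0) ∧ (p ≠ q ∧ p ≠ r) ∧ q ≠ r := by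
      simpa [List.nodup_cons, eq_comm] using hnd
    have hsort : List.Pairwise (· < ·) ([0, p, q, r] : List Int) := by
      simp [List.pairwise_cons]
      omega
    rw [hself] at hany
    simp only [pvGood, List.any_eq_true, List.mem_cons, List.not_mem_nil, or_false] at hany
    obtain ⟨t, htmem, hte⟩ := hany
    rcases htmem with rfl | rfl | rfl
    · have := pv_equal_sorted_eq hsort (by decide) hte
      simp at this
    · have := pv_equal_sorted_eq hsort (by decide) hte
      simp at this
    · have := pv_equal_sorted_eq hsort (by decide) hte
      simpa using this
  · rintro ⟨rfl, rfl, rfl⟩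
    exact ⟨by decide, by decide⟩

-- the core: on a sorted list, A's per-group body equals B's per-group body
theorem pv_core (total : Int) (s : List Int) (hs : s.Pairwise (· ≤ ·)) :
    pvAcore total s = bonusStepB total s := by
  match s, hs with
  | [], _ => rfl
  | [a], _ =>
      simp [pvAcore, bonusStepB, PySem.List.min?_id_cons, sub_self, pvGood,
        PySem.Set.ofList, PySem.Set.add, PySem.Set.contains, PySem.Set.len,
        PySem.Set.equal, PySem.Set.issubset, PySem.List.len_eq]
  | [a, b], hs =>
      have hab : a ≤ b := by simp [List.pairwise_cons] at hs; exact hs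
      have hmin : List.foldl min a [b] = a := by simp [min_eq_left hab]
      have hc := pv_cond2 (b - a) (by omega)
      simp only [bonusStepB, PySem.List.min?_id_cons, hmin]
      simp only [List.map, sub_self]
      norm_num [pvAcore, PySem.List.pyGetD, PySem.List.pyGet?, PySem.List.pyIdx?,
        show ((2:Int).toNat = 2) from rfl, show ((3:Int).toNat = 3) from rfl]
      rw [show PySem.List.len [a, b] = 2 from rfl]
      by_cases h3 : b - a = 3
      · rw [if_pos h3, if_pos (hc.mpr h3)]
      · rw [if_neg h3, if_neg (fun hcond => h3 (hc.mp hcond))]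
  | [a, b, c], hs =>
      have hab : a ≤ b ∧ a ≤ c ∧ b ≤ c := by
        simp [List.pairwise_cons] at hs; omega
      have hmin : List.foldl min a [b, c] = a := by
        simp [hab.1, hab.2.1]
      have hc := pv_cond3 (b - a) (c - a) (by omega) (by omega)
      simp only [bonusStepB, PySem.List.min?_id_cons, hmin]
      simp only [List.map, sub_self]
      norm_num [pvAcore, PySem.List.pyGetD, PySem.List.pyGet?, PySem.List.pyIdx?,
        show ((2:Int).toNat = 2) from rfl, show ((3:Int).toNat = 3) from rfl]
      rw [show PySem.List.len [a, b, c] = 3 from rfl]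
      by_cases h3 : b - a = 2 ∧ c - b = 2
      · rw [if_pos h3, if_pos (hc.mpr ⟨by omega, by omega⟩)]
      · rw [if_neg h3, if_neg (fun hcond => h3 (by have := hc.mp hcond; omega))]
  | [a, b, c, d], hs =>
      have hab : a ≤ b ∧ a ≤ c ∧ a ≤ d ∧ b ≤ c ∧ b ≤ d ∧ c ≤ d := by
        simp [List.pairwise_cons] at hs; omega
      have hmin : List.foldl min a [b, c, d] = a := by
        simp [min_def]; omega
      have hc := pv_cond4 (b - a) (c - a) (d - a) (by omega) (by omega) (by omega)
      simp only [bonusStepB, PySem.List.min?_id_cons, hmin]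
      simp only [List.map, sub_self]
      norm_num [pvAcore, PySem.List.pyGetD, PySem.List.pyGet?, PySem.List.pyIdx?,
        show ((2:Int).toNat = 2) from rfl, show ((3:Int).toNat = 3) from rfl]
      rw [show PySem.List.len [a, b, c, d] = 4 from rfl]
      by_cases h3 : b - a = 1 ∧ c - b = 2 ∧ d - c = 1
      · rw [if_pos h3, if_pos (hc.mpr ⟨by omega, by omega, by omega⟩)]
      · rw [if_neg h3, if_neg (fun hcond => h3 (by have := hc.mp hcond; omega))]
  | a :: b :: c :: d :: e :: t, _ =>
      have hlenA : pvAcore total (a :: b :: c :: d :: e :: t) = total := by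
        have h2 : ¬ ((a :: b :: c :: d :: e :: t).length = 2) := by simp
        have h3 : ¬ ((a :: b :: c :: d :: e :: t).length = 3) := by simp
        have h4 : ¬ ((a :: b :: c :: d :: e :: t).length = 4) := by simp
        simp only [pvAcore, if_neg h2, if_neg h3, if_neg h4]
      rw [hlenA]
      cases hm : PySem.List.min? (a :: b :: c :: d :: e :: t) (fun x => x) with
      | none => simp [bonusStepB, hm]
      | some m =>
        simp only [bonusStepB, hm]
        rw [if_neg]
        rintro ⟨hlen, hany⟩
        set L : List Int := (a :: b :: c :: d :: e :: t).map (fun x => x - m) with hL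
        have hlen' : (PySem.Set.ofList L).length = L.length := by
          have h1 : ((PySem.Set.ofList L).length : Int) = ((a :: b :: c :: d :: e :: t).length : Int) := by
            simpa [PySem.Set.len, PySem.List.len_eq] using hlen
          have h2 : L.length = (a :: b :: c :: d :: e :: t).length := by simp [hL]
          omega
        simp only [List.any_eq_true] at hany
        obtain ⟨tt, htmem, hte⟩ := hany
        have htnd : List.Nodup tt ∧ tt.length ≤ 4 := by
          simp only [pvGood, List.mem_cons, List.not_mem_nil, or_false] at htmem
          rcases htmem with rfl | rfl | rfl <;> exact ⟨by decide, by decide⟩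
        have := pv_equal_length (PySem.Set.nodup_ofList L) htnd.1 hte
        have hL5 : 5 ≤ L.length := by simp [hL]
        omega

theorem pv_step_eq (total : Int) (g : List Int) :
    bonusStepA total g = bonusStepB total g := by
  have hperm := PySem.List.sorted_perm g (fun x => x) false
  have hpair : (PySem.List.sorted g (fun x => x) false).Pairwise (· ≤ ·) := by
    rw [List.pairwise_iff_getElem]
    intro i j hi hj hij
    exact PySem.List.sorted_id_getElem_mono g (le_of_lt hij) hj
  rw [bonusStepA_eq, pv_core total _ hpair, pv_stepB_perm hperm total]

-- ===== VERDICT (by name: the statement is the Claim_ definition above) =====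
theorem bonus_spec : Claim_equal_bonus := by
  intro p _
  unfold Spec_bonus bonus bonus_alt
  rw [funext fun b => funext fun g => pv_step_eq b g]
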